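-- pv_equiv track=rewrite | github.com/SwetaKumariii/PALB-2CSE24-2410031530 | Assignment 9   /Problem-59.py | max_visible
-- ===== SOURCE A (Python) =====
-- def max_visible(arr):
--     n = len(arr)
--
--     left = [0] * n
--     right = [0] * n
--
--     stack = []
--
--     for i in range(n):
--         while stack and arr[stack[-1]] < arr[i]:
--             stack.pop()
--         if not stack:
--             left[i] = i
--         else:
--             left[i] = i - stack[-1] - 1
--         stack.append(i)
--
--     stack = []
--
--     for i in range(n - 1, -1, -1):
--         while stack and arr[stack[-1]] < arr[i]:
--             stack.pop()
--         if not stack: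
--             right[i] = n - i - 1
--         else:
--             right[i] = stack[-1] - i - 1
--         stack.append(i)
--
--     ans = 0
--
--     for i in range(n):
--         ans = max(ans, left[i] + right[i] + 1)
--
--     return ans
-- ===== SOURCE B (Python) =====
-- def max_visible(arr):
--     n = len(arr)
--
--     def count_down(x, j):
--         c = 0
--         while j >= 0 and arr[j] < x:
--             c += 1
--             j -= 1
--         return c
--
--     def count_up(x, j):
--         c = 0
--         while j < n and arr[j] < x:
--             c += 1
--             j += 1
--         return c
--
--     ans = 0
--     for i in range(n):
--         ans = max(ans, count_down(arr[i], i - 1) + count_up(arr[i], i + 1) + 1)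
--     return ans
-- ===== Notes on version B (the rewrite author's own statement) =====
-- stated objective: simpler
-- what changed: Replaced the two monotonic-stack passes plus a combine pass with a direct per-index bidirectional scan (count strictly-smaller neighbours left and right until the first >= element) folded into one max.
import Mathlib
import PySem

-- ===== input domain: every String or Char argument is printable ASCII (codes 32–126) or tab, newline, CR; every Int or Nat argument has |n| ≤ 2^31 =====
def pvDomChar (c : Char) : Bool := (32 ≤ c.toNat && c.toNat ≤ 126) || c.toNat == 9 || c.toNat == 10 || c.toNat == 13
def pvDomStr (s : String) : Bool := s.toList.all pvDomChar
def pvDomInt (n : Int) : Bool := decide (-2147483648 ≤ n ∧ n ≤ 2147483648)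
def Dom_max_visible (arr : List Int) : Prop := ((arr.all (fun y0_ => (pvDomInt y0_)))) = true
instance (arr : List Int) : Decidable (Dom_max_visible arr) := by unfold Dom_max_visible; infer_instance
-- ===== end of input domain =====

-- B replaces A's two monotonic-stack passes by a per-index bidirectional linear scan: simpler, not faster.

-- ===== PORT A =====
-- the value A's left loop records at step i from the popped stack (if not stack: i; else i - stack[-1] - 1)
def tv (i : Nat) (s : List Nat) : Int :=
  match s with
  | [] => (i : Int)
  | j :: _ => (i : Int) - (j : Int) - 1

-- the value A's right loop records at step i (if not stack: n - i - 1; else stack[-1] - i - 1)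
def tvR (n i : Nat) (s : List Nat) : Int :=
  match s with
  | [] => (n : Int) - (i : Int) - 1
  | j :: _ => (j : Int) - (i : Int) - 1

-- stack is head-first (head = Python's stack[-1]); the pop-while loop is dropWhile on the head.
-- one step of A's first (left) loop: pop, record left[i], push i; left entries appended in order
def stepL (arr : List Int) (st : List Nat × List Int) (i : Nat) : List Nat × List Int :=
  let s := st.1.dropWhile (fun j => arr.getD j 0 < arr.getD i 0)
  (i :: s, st.2 ++ [tv i s])

-- one step of A's second (right) loop, iterating i = n-1 … 0; right entries consed so the
-- final list comes out in increasing index order, matching Python's right[i] = …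
def stepR (arr : List Int) (st : List Nat × List Int) (i : Nat) : List Nat × List Int :=
  let s := st.1.dropWhile (fun j => arr.getD j 0 < arr.getD i 0)
  (i :: s, tvR arr.length i s :: st.2)

def max_visible (arr : List Int) : Int :=
  let n := arr.length
  let left := ((List.range n).foldl (stepL arr) ([], [])).2
  let right := (((List.range n).reverse).foldl (stepR arr) ([], [])).2
  (List.range n).foldl (fun ans i => max ans (left.getD i 0 + right.getD i 0 + 1)) 0

-- ===== PORT B =====
-- count_down in Source B: scan j = k-1, k-2, … while j ≥ 0 and arr[j] < x (argument is j+1, so 0 ↦ j = -1)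
def cntDown (arr : List Int) (x : Int) : Nat → Int
  | 0 => 0
  | k + 1 => if arr.getD k 0 < x then 1 + cntDown arr x k else 0

-- count_up in Source B: scan j upward while j < n and arr[j] < x; fuel ≥ n - j makes the
-- while loop structural (the j < arr.length test is the loop guard, exactly as in Source B)
def cntUp (arr : List Int) (x : Int) : Nat → Nat → Int
  | 0, _ => 0
  | f + 1, j => if j < arr.length then (if arr.getD j 0 < x then 1 + cntUp arr x f (j + 1) else 0) else 0

def max_visible_alt (arr : List Int) : Int :=
  (List.range arr.length).foldl
    (fun ans i =>
      max ans (cntDown arr (arr.getD i 0) i + cntUp arr (arr.getD i 0) arr.length (i + 1) + 1)) 0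

-- ===== PRECONDITION & SPEC =====
def Spec_max_visible (arr : List Int) (out : Int) : Prop := out = max_visible_alt arr
instance (arr : List Int) (out : Int) : Decidable (Spec_max_visible arr out) := by unfold Spec_max_visible; infer_instance

-- ===== CLAIM (what is proved, stated in full; the proofs are below) =====
def Claim_equal_max_visible : Prop := ∀ (arr : List Int), Dom_max_visible arr → Spec_max_visible arr (max_visible arr)

-- ===== LEMMAS AND PROOFS =====

-- the stack A's loops maintain, abstractly: after processing indices 0..i-1 of g
def stk (g : Nat → Int) : Nat → List Nat
  | 0 => []
  | i + 1 => i :: (stk g i).dropWhile (fun j => g j < g i)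

-- the count B's scans compute, abstractly: consecutive j = k-1, k-2, … with g j < x
def cnt (g : Nat → Int) (x : Int) : Nat → Int
  | 0 => 0
  | k + 1 => if g k < x then 1 + cnt g x k else 0

theorem tv_succ (i : Nat) (s : List Nat) : tv (i + 1) s = 1 + tv i s := by
  cases s <;> simp [tv] <;> omega

theorem dropWhile_dropWhile_of_imp {α : Type} (p q : α → Bool) (l : List α)
    (h : ∀ a, q a = true → p a = true) :
    (l.dropWhile q).dropWhile p = l.dropWhile p := by
  induction l with
  | nil => rfl
  | cons a l ih =>
    by_cases hq : q a = true
    · simp [hq, h a hq, ih]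
    · simp [List.dropWhile_cons, hq]

theorem mem_stk_lt (g : Nat → Int) (i : Nat) : ∀ j ∈ stk g i, j < i := by
  induction i with
  | zero => simp [stk]
  | succ i ih =>
    intro j hj
    simp only [stk, List.mem_cons] at hj
    rcases hj with h | h
    · omega
    · have := ih j ((stk g i).dropWhile_sublist _ |>.mem h)
      omega

-- the heart: A's recorded value at step i (from the popped stack) is B's leftward count
theorem tv_stk_eq_cnt (g : Nat → Int) (x : Int) (i : Nat) :
    tv i ((stk g i).dropWhile (fun j => g j < x)) = cnt g x i := by
  induction i with
  | zero => simp [stk, tv, cnt]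
  | succ i ih =>
    by_cases hgi : g i < x
    · have himp : ∀ a, decide (g a < g i) = true → decide (g a < x) = true := by
        intro a ha
        simp only [decide_eq_true_eq] at *
        exact lt_trans ha hgi
      simp only [stk, List.dropWhile_cons, hgi, decide_true, if_true,
        dropWhile_dropWhile_of_imp _ _ _ himp, tv_succ, ih, cnt]
    · simp only [stk, List.dropWhile_cons, hgi, decide_false, if_false, cnt]
      simp [tv]

-- A's left pass over the first m indices: the stack is stk, the entries are the counts
theorem foldL_eq (arr : List Int) (m : Nat) :
    (List.range m).foldl (stepL arr) ([], []) =
      (stk (fun j => arr.getD j 0) m,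
       (List.range m).map (fun k => cnt (fun j => arr.getD j 0) (arr.getD k 0) k)) := by
  induction m with
  | zero => rfl
  | succ m ih =>
    rw [List.range_succ, List.foldl_append, ih]
    simp only [List.foldl_cons, List.foldl_nil, stepL, List.map_append, List.map_cons,
      List.map_nil, Prod.mk.injEq]
    refine ⟨rfl, ?_⟩
    congr 1
    exact congrArg (fun z => [z]) (tv_stk_eq_cnt (fun j => arr.getD j 0) (arr.getD m 0) m)

-- (range n).reverse as a map, to mirror the right pass onto the left-pass machinery
theorem range_reverse_eq_map (n : Nat) :
    (List.range n).reverse = (List.range n).map (fun k => n - 1 - k) := by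
  apply List.ext_getElem
  · simp
  · intro i h1 h2
    simp only [List.length_reverse, List.length_range] at h1
    simp only [List.getElem_reverse, List.length_range, List.getElem_map, List.getElem_range]

theorem dropWhile_map' {α β : Type} (f : α → β) (p : β → Bool) (l : List α) :
    (l.map f).dropWhile p = (l.dropWhile (fun a => p (f a))).map f := by
  induction l with
  | nil => rfl
  | cons a l ih =>
    by_cases h : p (f a) = true <;> simp [h, ih]

-- the right loop's recorded value, read through the index mirror k ↦ n-1-k, is tv
theorem tvR_map (n m : Nat) (hm : m < n) (s : List Nat) (hs : ∀ k ∈ s, k < m) :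
    tvR n (n - 1 - m) (s.map (fun k => n - 1 - k)) = tv m s := by
  cases s with
  | nil =>
    simp only [List.map_nil, tvR, tv]
    omega
  | cons k s =>
    have hk : k < m := hs k List.mem_cons_self
    simp only [List.map_cons, tvR, tv]
    omega

-- A's right pass over its first m steps (indices n-1 … n-m): the mirrored stack and counts
theorem foldR_eq (arr : List Int) (m : Nat) (hm : m ≤ arr.length) :
    (List.range m).foldl (fun st k => stepR arr st (arr.length - 1 - k)) ([], []) =
      ((stk (fun k => arr.getD (arr.length - 1 - k) 0) m).map (fun k => arr.length - 1 - k),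
       ((List.range m).map (fun k =>
          cnt (fun j => arr.getD (arr.length - 1 - j) 0) (arr.getD (arr.length - 1 - k) 0) k)).reverse) := by
  induction m with
  | zero => rfl
  | succ m ih =>
    have hmn : m < arr.length := by omega
    rw [List.range_succ, List.foldl_append, ih (by omega)]
    simp only [List.foldl_cons, List.foldl_nil, stepR, List.map_append, List.map_cons,
      List.map_nil, List.reverse_append, List.reverse_cons, List.reverse_nil, List.nil_append,
      List.singleton_append, Prod.mk.injEq]
    have hdw : ((stk (fun k => arr.getD (arr.length - 1 - k) 0) m).map (fun k => arr.length - 1 - k)).dropWhile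
        (fun j => arr.getD j 0 < arr.getD (arr.length - 1 - m) 0) =
        ((stk (fun k => arr.getD (arr.length - 1 - k) 0) m).dropWhile
          (fun k => arr.getD (arr.length - 1 - k) 0 < arr.getD (arr.length - 1 - m) 0)).map
          (fun k => arr.length - 1 - k) := by
      rw [dropWhile_map']
    refine ⟨?_, ?_⟩
    · rw [hdw]
      rfl
    · congr 1
      rw [hdw, tvR_map arr.length m hmn]
      · exact tv_stk_eq_cnt (fun k => arr.getD (arr.length - 1 - k) 0) (arr.getD (arr.length - 1 - m) 0) m
      · intro k hk
        exact mem_stk_lt _ m k (((stk _ m).dropWhile_sublist _).mem hk)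

-- B's downward scan is cnt
theorem cntDown_eq (arr : List Int) (x : Int) (k : Nat) :
    cntDown arr x k = cnt (fun j => arr.getD j 0) x k := by
  induction k with
  | zero => rfl
  | succ k ih => simp [cntDown, cnt, ih]

-- B's upward scan is the mirrored cnt
theorem cntUp_eq (arr : List Int) (x : Int) (f j : Nat) (hf : arr.length ≤ j + f) :
    cntUp arr x f j = cnt (fun k => arr.getD (arr.length - 1 - k) 0) x (arr.length - j) := by
  induction f generalizing j with
  | zero =>
    have h0 : arr.length - j = 0 := by omega
    simp [cntUp, h0, cnt]
  | succ f ih =>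
    by_cases hj : j < arr.length
    · have hm : arr.length - j = (arr.length - (j + 1)) + 1 := by omega
      rw [cntUp, if_pos hj, hm, cnt]
      have hidx : arr.length - 1 - (arr.length - (j + 1)) = j := by omega
      rw [hidx, ih (j + 1) (by omega)]
    · have h0 : arr.length - j = 0 := by omega
      simp [cntUp, hj, h0, cnt]

-- getD of a mapped range
theorem getD_map_range {β : Type} [Inhabited β] (n i : Nat) (f : Nat → β) (d : β) (hi : i < n) :
    (((List.range n).map f).getD i d) = f i := by
  rw [List.getD_eq_getElem _ _ (by simpa using hi)]
  simp

theorem getD_reverse_map_range {β : Type} [Inhabited β] (n i : Nat) (f : Nat → β) (d : β) (hi : i < n) :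
    ((((List.range n).map f).reverse).getD i d) = f (n - 1 - i) := by
  rw [List.getD_eq_getElem _ _ (by simpa using hi)]
  simp only [List.getElem_reverse, List.length_map, List.length_range, List.getElem_map,
    List.getElem_range]

-- ===== VERDICT (by name: the statement is the Claim_ definition above) =====
theorem max_visible_spec : Claim_equal_max_visible := by
  intro arr _
  show (List.range arr.length).foldl
      (fun ans i =>
        max ans ((((List.range arr.length).foldl (stepL arr) ([], [])).2).getD i 0 +
          ((((List.range arr.length).reverse).foldl (stepR arr) ([], [])).2).getD i 0 + 1)) 0 =
    max_visible_alt arr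
  unfold max_visible_alt
  rw [foldL_eq, range_reverse_eq_map, List.foldl_map, foldR_eq arr arr.length le_rfl]
  apply PySem.List.foldl_congr_mem
  intro acc i hi
  have hin : i < arr.length := by simpa using hi
  rw [getD_map_range arr.length i _ 0 hin, getD_reverse_map_range arr.length i _ 0 hin]
  have e2 : cntUp arr (arr.getD i 0) arr.length (i + 1) =
      cnt (fun k => arr.getD (arr.length - 1 - k) 0) (arr.getD i 0) (arr.length - 1 - i) := by
    rw [cntUp_eq arr _ _ _ (by omega)]
    congr 1
    omega
  have e3 : arr.getD (arr.length - 1 - (arr.length - 1 - i)) 0 = arr.getD i 0 := by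
    congr 1
    omega
  rw [cntDown_eq, e2, e3]
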